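-- pv_equiv track=rewrite | github.com/ishaanbuildsthings/leetcode | templates/polygonAreaConvexHullUnorderedPoints.py | polygonAreaUnordered
-- ===== SOURCE A (Python) =====
-- def polygonAreaUnordered(points):
--     points = sorted(set(points))
--     if len(points) <= 2:
--         return 0
--
--     def cross(o, a, b):
--         return (a[0]-o[0])*(b[1]-o[1]) - (a[1]-o[1])*(b[0]-o[0])
--
--     lower = []
--     for p in points:
--         while len(lower) >= 2 and cross(lower[-2], lower[-1], p) <= 0:
--             lower.pop()
--         lower.append(p)
--
--     upper = []
--     for p in reversed(points):
--         while len(upper) >= 2 and cross(upper[-2], upper[-1], p) <= 0: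
--             upper.pop()
--         upper.append(p)
--
--     hull = lower[:-1] + upper[:-1]
--
--     area2 = 0
--     n = len(hull)
--     for i in range(n):
--         x1, y1 = hull[i]
--         x2, y2 = hull[(i+1) % n]
--         area2 += x1*y2 - y1*x2
--
--     return abs(area2)
-- ===== SOURCE B (Python) =====
-- def _turn(o, a, b):
--     return (a[0] - o[0]) * (b[1] - o[1]) - (a[1] - o[1]) * (b[0] - o[0])
--
--
-- def _trap(a, b):
--     return (a[0] + b[0]) * (b[1] - a[1])
--
--
-- def _chainArea(seq):
--     # Maintain the hull chain as a stack and the signed trapezoid area under it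
--     # incrementally: subtract a trapezoid on every pop, add one on every push.
--     st = []
--     area = 0
--     for p in seq:
--         while len(st) >= 2 and _turn(st[-2], st[-1], p) <= 0:
--             q = st.pop()
--             area -= _trap(st[-1], q)
--         if st:
--             area += _trap(st[-1], p)
--         st.append(p)
--     return area
--
--
-- def polygonAreaUnordered(points):
--     pts = sorted(set(points))
--     if len(pts) <= 2:
--         return 0
--     return abs(_chainArea(pts) + _chainArea(pts[::-1]))
-- ===== Notes on version B (the rewrite author's own statement) =====
-- stated objective: alternative
-- what changed: B never builds the hull: each monotone scan is a single fused fold that keeps a running signed trapezoid area (subtracted on stack pop, added on push), and the answer is |area(forward scan) + area(backward scan)|, replacing A's hull concatenation and mod-indexed shoelace loop.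
import Mathlib
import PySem

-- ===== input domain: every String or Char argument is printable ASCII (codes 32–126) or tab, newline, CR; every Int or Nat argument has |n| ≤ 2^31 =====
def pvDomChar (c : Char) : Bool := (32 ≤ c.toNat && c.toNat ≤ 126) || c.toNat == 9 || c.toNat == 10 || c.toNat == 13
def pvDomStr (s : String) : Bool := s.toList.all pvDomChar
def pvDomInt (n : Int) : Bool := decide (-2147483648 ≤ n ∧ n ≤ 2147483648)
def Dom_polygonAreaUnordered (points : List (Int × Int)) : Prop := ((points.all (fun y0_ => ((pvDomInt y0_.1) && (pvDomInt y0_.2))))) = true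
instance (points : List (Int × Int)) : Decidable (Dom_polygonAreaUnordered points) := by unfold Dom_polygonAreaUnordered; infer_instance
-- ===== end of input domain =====

-- B replaces A's hull construction + mod-indexed shoelace by two fused folds that keep a
-- running trapezoid area while maintaining the monotone-chain stack (same return value).

-- ===== PORT A =====
def pvCross (o a b : Int × Int) : Int :=
  (a.1 - o.1) * (b.2 - o.2) - (a.2 - o.2) * (b.1 - o.1)

-- 'while len(st) >= 2 and cross(st[-2], st[-1], p) <= 0: st.pop()'; the Python list is kept
-- reversed (list head = Python st[-1]), so append = cons and pop = drop the head
def pvPopA (st : List (Int × Int)) (p : Int × Int) : List (Int × Int) :=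
  match st with
  | b :: a :: rest => if pvCross a b p ≤ 0 then pvPopA (a :: rest) p else b :: a :: rest
  | _ => st

-- the 'for p in seq' chain-building loop; result is the Python chain list reversed
def pvChainRev (seq : List (Int × Int)) : List (Int × Int) :=
  seq.foldl (fun st p => p :: pvPopA st p) []

def polygonAreaUnordered (points : List (Int × Int)) : Int :=
  let pts := PySem.List.sorted2 (PySem.Set.ofList points) (fun q => q.1) (fun q => q.2)
  if pts.length ≤ 2 then 0
  else
    let lower := (pvChainRev pts).reverse
    let upper := (pvChainRev pts.reverse).reverse
    let hull := lower.dropLast ++ upper.dropLast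
    let n : Int := hull.length
    let area2 := (PySem.List.pyRange 0 n 1).foldl (fun acc i =>
      let p1 := PySem.List.pyGetD hull i (0, 0)
      let p2 := PySem.List.pyGetD hull (PySem.Int.mod (i + 1) n) (0, 0)
      acc + (p1.1 * p2.2 - p1.2 * p2.1)) 0
    |area2|

-- ===== PORT B =====
def pvTurn (o a b : Int × Int) : Int :=
  (a.1 - o.1) * (b.2 - o.2) - (a.2 - o.2) * (b.1 - o.1)

def pvTrap (a b : Int × Int) : Int := (a.1 + b.1) * (b.2 - a.2)

-- the while-pop loop of _chainArea: pop and subtract the popped trapezoid (stack reversed)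
def pvPopB (st : List (Int × Int)) (area : Int) (p : Int × Int) : List (Int × Int) × Int :=
  match st with
  | b :: a :: rest =>
      if pvTurn a b p ≤ 0 then pvPopB (a :: rest) (area - pvTrap a b) p
      else (b :: a :: rest, area)
  | _ => (st, area)

def pvChainArea (seq : List (Int × Int)) : Int :=
  (seq.foldl (fun s p =>
      let t := pvPopB s.1 s.2 p
      (p :: t.1, t.2 + (match t.1 with | [] => 0 | top :: _ => pvTrap top p))) ([], 0)).2

def polygonAreaUnordered_alt (points : List (Int × Int)) : Int :=
  let pts := PySem.List.sorted2 (PySem.Set.ofList points) (fun q => q.1) (fun q => q.2)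
  if pts.length ≤ 2 then 0
  else |pvChainArea pts + pvChainArea pts.reverse|

-- ===== PRECONDITION & SPEC =====
def Spec_polygonAreaUnordered (points : List (Int × Int)) (out : Int) : Prop := out = polygonAreaUnordered_alt points
instance (points : List (Int × Int)) (out : Int) : Decidable (Spec_polygonAreaUnordered points out) := by unfold Spec_polygonAreaUnordered; infer_instance

-- ===== CLAIM (what is proved, stated in full; the proofs are below) =====
def Claim_equal_polygonAreaUnordered : Prop := ∀ (points : List (Int × Int)), Dom_polygonAreaUnordered points → Spec_polygonAreaUnordered points (polygonAreaUnordered points)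

-- ===== LEMMAS AND PROOFS =====

-- shoelace edge term and open-chain sums used only in the proofs
def pvG (a b : Int × Int) : Int := a.1 * b.2 - a.2 * b.1

def pvS : List (Int × Int) → Int
  | a :: b :: t => pvG a b + pvS (b :: t)
  | _ => 0

def pvT : List (Int × Int) → Int
  | a :: b :: t => pvTrap a b + pvT (b :: t)
  | _ => 0

-- trapezoid sum of a reversed chain (stack order)
def pvTR : List (Int × Int) → Int
  | b :: a :: rest => pvTrap a b + pvTR (a :: rest)
  | _ => 0

theorem pvPopA_ne_nil (st : List (Int × Int)) (p : Int × Int) (h : st ≠ []) :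
    pvPopA st p ≠ [] := by
  fun_induction pvPopA st p with
  | case1 b a rest hc ih => exact ih (by simp)
  | case2 b a rest hc => simp
  | case3 st h2 => simpa [pvPopA] using h

theorem pvPopA_getLast? (st : List (Int × Int)) (p : Int × Int) :
    (pvPopA st p).getLast? = st.getLast? := by
  fun_induction pvPopA st p with
  | case1 b a rest hc ih => rw [ih]; simp
  | case2 b a rest hc => rfl
  | case3 st h2 => rfl


theorem pvChain_getLast? (seq : List (Int × Int)) (st : List (Int × Int)) (h : st ≠ []) :
    (seq.foldl (fun st p => p :: pvPopA st p) st).getLast? = st.getLast? := by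
  induction seq generalizing st with
  | nil => rfl
  | cons p rest ih =>
      rw [List.foldl_cons, ih _ (by simp)]
      obtain ⟨x, xs, hx⟩ := List.exists_cons_of_ne_nil (pvPopA_ne_nil st p h)
      rw [hx, List.getLast?_cons_cons, ← hx, pvPopA_getLast?]

theorem pvChain_head? (seq : List (Int × Int)) (st : List (Int × Int)) (q : Int × Int) :
    ((seq ++ [q]).foldl (fun st p => p :: pvPopA st p) st).head? = some q := by
  rw [List.foldl_append]; rfl

theorem pvChain_len2 (seq : List (Int × Int)) (st : List (Int × Int)) (hst : st ≠ [])
    (hseq : seq ≠ []) : 2 ≤ (seq.foldl (fun st p => p :: pvPopA st p) st).length := by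
  induction seq generalizing st with
  | nil => exact absurd rfl hseq
  | cons p rest ih =>
      rcases rest with _ | ⟨r, rs⟩
      · have h1 := List.length_pos_iff.mpr (pvPopA_ne_nil st p hst)
        simp only [List.foldl_cons, List.foldl_nil, List.length_cons]
        omega
      · exact ih _ (by simp) (by simp)


theorem pvChainRev_getLast? (pts : List (Int × Int)) (h : pts ≠ []) :
    (pvChainRev pts).getLast? = pts.head? := by
  obtain ⟨p, rest, rfl⟩ := List.exists_cons_of_ne_nil h
  unfold pvChainRev
  rw [List.foldl_cons]
  have h0 : p :: pvPopA [] p = [p] := by simp [pvPopA]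
  rw [h0, pvChain_getLast? rest [p] (by simp)]
  rfl

theorem pvChainRev_head? (pts : List (Int × Int)) (h : pts ≠ []) :
    (pvChainRev pts).head? = pts.getLast? := by
  conv_lhs => rw [← List.dropLast_append_getLast h]
  rw [List.getLast?_eq_some_getLast h]
  exact pvChain_head? _ _ _

theorem pvChainRev_len2 (pts : List (Int × Int)) (h : 2 ≤ pts.length) :
    2 ≤ (pvChainRev pts).length := by
  have hne : pts ≠ [] := by rintro rfl; simp at h
  obtain ⟨p, rest, rfl⟩ := List.exists_cons_of_ne_nil hne
  unfold pvChainRev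
  rw [List.foldl_cons]
  have h1 : p :: pvPopA [] p = [p] := by simp [pvPopA]
  rw [h1]
  exact pvChain_len2 rest [p] (by simp) (by rintro rfl; simp at h)

theorem pvPopB_spec (st : List (Int × Int)) (p : Int × Int) (c : Int) :
    pvPopB st (pvTR st + c) p = (pvPopA st p, pvTR (pvPopA st p) + c) := by
  induction st using pvPopA.induct p with
  | case1 b a rest hc ih =>
      rw [pvPopA, if_pos hc]
      rw [pvPopB]
      have ht : pvTurn a b p ≤ 0 := hc
      rw [if_pos ht]
      have : pvTR (b :: a :: rest) + c - pvTrap a b = pvTR (a :: rest) + c := by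
        simp [pvTR]; ring
      rw [this, ih]
  | case2 b a rest hc =>
      rw [pvPopA, if_neg hc, pvPopB]
      have ht : ¬ pvTurn a b p ≤ 0 := hc
      rw [if_neg ht]
  | case3 st h2 =>
      rcases st with _ | ⟨x, _ | ⟨y, t⟩⟩
      · simp [pvPopB, pvPopA]
      · simp [pvPopB, pvPopA]
      · exact (h2 x y t rfl).elim

theorem pvFoldB_spec (seq : List (Int × Int)) (st : List (Int × Int)) :
    seq.foldl (fun s p =>
      let t := pvPopB s.1 s.2 p
      (p :: t.1, t.2 + (match t.1 with | [] => 0 | top :: _ => pvTrap top p))) (st, pvTR st)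
    = (seq.foldl (fun st p => p :: pvPopA st p) st,
       pvTR (seq.foldl (fun st p => p :: pvPopA st p) st)) := by
  induction seq generalizing st with
  | nil => rfl
  | cons p rest ih =>
      rw [List.foldl_cons, List.foldl_cons]
      have hpop : pvPopB st (pvTR st) p = (pvPopA st p, pvTR (pvPopA st p)) := by
        have := pvPopB_spec st p 0
        simpa using this
      have hstep : (let t := pvPopB (st, pvTR st).1 (st, pvTR st).2 p;
          (p :: t.1, t.2 + (match t.1 with | [] => 0 | top :: tail => pvTrap top p)))
          = (p :: pvPopA st p, pvTR (p :: pvPopA st p)) := by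
        simp only [hpop]
        rcases hp : pvPopA st p with _ | ⟨top, rest'⟩
        · simp [pvTR]
        · simp [pvTR]; ring
      rw [hstep]
      exact ih _

theorem pvChainArea_eq (seq : List (Int × Int)) : pvChainArea seq = pvTR (pvChainRev seq) := by
  unfold pvChainArea pvChainRev
  rw [show (([], (0:Int)) : List (Int × Int) × Int) = ([], pvTR []) from rfl,
    pvFoldB_spec seq []]

theorem pvT_split (xs : List (Int × Int)) (y : Int × Int) (ys : List (Int × Int)) :
    pvT (xs ++ y :: ys) = pvT (xs ++ [y]) + pvT (y :: ys) := by
  induction xs with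
  | nil => simp [pvT]
  | cons a xs' ih =>
      rcases xs' with _ | ⟨b, xs''⟩
      · simp [pvT]
      · simp only [List.cons_append] at *
        rw [pvT, pvT, ih]
        ring

theorem pvTR_eq_pvT_reverse (st : List (Int × Int)) : pvTR st = pvT st.reverse := by
  induction st using pvTR.induct with
  | case1 b a rest ih =>
      rw [pvTR, ih]
      have h1 : (b :: a :: rest).reverse = rest.reverse ++ a :: [b] := by simp
      have h2 : (a :: rest).reverse = rest.reverse ++ [a] := by simp
      rw [h1, h2, pvT_split rest.reverse a [b]]
      simp [pvT]
      ring
  | case2 st h2 =>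
      rcases st with _ | ⟨x, _ | ⟨y, t⟩⟩
      · rfl
      · rfl
      · exact (h2 x y t rfl).elim

theorem pvS_eq_pvT_closed (xs : List (Int × Int)) (a b : Int × Int) :
    pvT (a :: xs ++ [b]) - pvS (a :: xs ++ [b]) = b.1 * b.2 - a.1 * a.2 := by
  induction xs generalizing a with
  | nil => simp [pvT, pvS, pvTrap, pvG]; ring
  | cons c xs' ih =>
      simp only [List.cons_append] at *
      rw [pvT, pvS]
      have := ih c
      simp [pvTrap, pvG] at *
      ring_nf at *
      omega

theorem pvRangeFold_eq_pvS (t : List (Int × Int)) (b : Int × Int) (A : Int) :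
    (List.range t.length).foldl
      (fun acc k => acc + pvG ((b :: t).getD k (0, 0)) ((b :: t).getD (k + 1) (0, 0))) A
    = A + pvS (b :: t) := by
  induction t generalizing b A with
  | nil => simp [pvS]
  | cons c t' ih =>
      rw [List.length_cons, List.range_succ_eq_map, List.foldl_cons, List.foldl_map]
      have hbody : (fun (x : Int) (y : Nat) => x +
            pvG ((b :: c :: t').getD y.succ (0, 0)) ((b :: c :: t').getD (y.succ + 1) (0, 0)))
          = (fun acc k => acc + pvG ((c :: t').getD k (0, 0)) ((c :: t').getD (k + 1) (0, 0))) := by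
        funext x y
        simp [Nat.succ_eq_add_one]
      have h0 : A + pvG ((b :: c :: t').getD 0 (0, 0)) ((b :: c :: t').getD (0 + 1) (0, 0))
          = A + pvG b c := by simp
      rw [hbody, h0, ih c (A + pvG b c), pvS]
      ring

theorem pvDecomp2 (l : List (Int × Int)) (x y : Int × Int) (h2 : 2 ≤ l.length)
    (hh : l.head? = some x) (hl : l.getLast? = some y) :
    ∃ mid, l = x :: mid ++ [y] := by
  rcases l with _ | ⟨a, t⟩
  · simp at hh
  · have hax : a = x := by simpa using hh
    have ht : t ≠ [] := by rintro rfl; simp at h2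
    have hlast : (a :: t).getLast (by simp) = y := by
      rw [List.getLast?_eq_some_getLast (l := a :: t) (by simp)] at hl
      simpa using hl
    have hgl : t.getLast ht = y := by
      rw [← hlast, List.getLast_cons ht]
    refine ⟨t.dropLast, ?_⟩
    rw [← hax, ← hgl]
    simp [List.dropLast_append_getLast ht]

-- ===== VERDICT (by name: the statement is the Claim_ definition above) =====
theorem polygonAreaUnordered_spec : Claim_equal_polygonAreaUnordered := by
  intro points _
  unfold Spec_polygonAreaUnordered
  show polygonAreaUnordered points = polygonAreaUnordered_alt points
  unfold polygonAreaUnordered polygonAreaUnordered_alt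
  set pts := PySem.List.sorted2 (PySem.Set.ofList points) (fun q => q.1) (fun q => q.2) with hpts
  clear hpts
  by_cases hlen : pts.length ≤ 2
  · simp only [if_pos hlen]
  · simp only [if_neg hlen]
    have hp3 : 3 ≤ pts.length := by omega
    have hpne : pts ≠ [] := by
      intro h; rw [h] at hp3; simp at hp3
    have hp2 : 2 ≤ pts.length := by omega
    have hrne : pts.reverse ≠ [] := by simpa using hpne
    have hr2 : 2 ≤ pts.reverse.length := by simpa using hp2
    obtain ⟨p0, hp0⟩ : ∃ p0, pts.head? = some p0 := by
      rcases pts with _ | ⟨a, t⟩; · exact absurd rfl hpne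
      exact ⟨a, rfl⟩
    obtain ⟨pe, hpe⟩ : ∃ pe, pts.getLast? = some pe := by
      exact ⟨pts.getLast hpne, List.getLast?_eq_some_getLast hpne⟩
    set L := (pvChainRev pts).reverse with hL
    set U := (pvChainRev pts.reverse).reverse with hU
    have hL2 : 2 ≤ L.length := by
      rw [hL, List.length_reverse]; exact pvChainRev_len2 pts hp2
    have hU2 : 2 ≤ U.length := by
      rw [hU, List.length_reverse]; exact pvChainRev_len2 pts.reverse hr2
    have hLh : L.head? = some p0 := by
      rw [hL, List.head?_reverse, pvChainRev_getLast? pts hpne]; exact hp0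
    have hLl : L.getLast? = some pe := by
      rw [hL, List.getLast?_reverse, pvChainRev_head? pts hpne]; exact hpe
    have hUh : U.head? = some pe := by
      rw [hU, List.head?_reverse, pvChainRev_getLast? pts.reverse hrne,
        List.head?_reverse]; exact hpe
    have hUl : U.getLast? = some p0 := by
      rw [hU, List.getLast?_reverse, pvChainRev_head? pts.reverse hrne,
        List.getLast?_reverse]; exact hp0
    obtain ⟨mid, hLdec⟩ := pvDecomp2 L p0 pe hL2 hLh hLl
    obtain ⟨umid, hUdec⟩ := pvDecomp2 U pe p0 hU2 hUh hUl
    have hLdrop : L.dropLast = p0 :: mid := by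
      rw [hLdec, show p0 :: mid ++ [pe] = (p0 :: mid) ++ [pe] by simp,
        List.dropLast_concat]
    have hUdrop : U.dropLast = pe :: umid := by
      rw [hUdec, show pe :: umid ++ [p0] = (pe :: umid) ++ [p0] by simp,
        List.dropLast_concat]
    have hhull : L.dropLast ++ U.dropLast = p0 :: (mid ++ pe :: umid) := by
      rw [hLdrop, hUdrop]; simp
    rw [hhull]
    set hull := p0 :: (mid ++ pe :: umid) with hhdef
    set ctail := mid ++ pe :: umid ++ [p0] with hct
    have hcyc : hull ++ [p0] = p0 :: ctail := by simp [hhdef, hct]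
    have hnpos : (0:Int) < (hull.length : Int) := by
      simp only [hhdef, List.length_cons]; push_cast; omega
    have hlencyc : ctail.length = hull.length := by simp [hct, hhdef]; omega
    -- step (a): replace the mod-indexed body by indexing into the closed chain
    have hcongr : (PySem.List.pyRange 0 (hull.length : Int) 1).foldl (fun acc i =>
        let p1 := PySem.List.pyGetD hull i (0, 0)
        let p2 := PySem.List.pyGetD hull (PySem.Int.mod (i + 1) (hull.length : Int)) (0, 0)
        acc + (p1.1 * p2.2 - p1.2 * p2.1)) 0
        = (PySem.List.pyRange 0 (hull.length : Int) 1).foldl (fun acc i =>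
        acc + pvG (PySem.List.pyGetD (p0 :: ctail) i (0, 0))
          (PySem.List.pyGetD (p0 :: ctail) (i + 1) (0, 0))) 0 := by
      apply PySem.List.foldl_congr_mem
      intro acc i hi
      have hib : 0 ≤ i ∧ i < (hull.length : Int) := by
        have := (PySem.List.mem_pyRange_one (a := 0) (b := (hull.length : Int)) (x := i)).mp hi
        omega
      have h1 : PySem.List.pyGetD hull i (0, 0) = PySem.List.pyGetD (p0 :: ctail) i (0, 0) := by
        rw [PySem.List.pyGetD_of_nonneg hull (0, 0) hib.1,
          PySem.List.pyGetD_of_nonneg (p0 :: ctail) (0, 0) hib.1,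
          show p0 :: ctail = hull ++ [p0] from hcyc.symm,
          List.getD_append _ _ _ _ (by have := hib.2; omega)]
      have h2 : PySem.List.pyGetD hull (PySem.Int.mod (i + 1) (hull.length : Int)) (0, 0)
          = PySem.List.pyGetD (p0 :: ctail) (i + 1) (0, 0) := by
        rw [PySem.Int.mod_eq_emod_of_pos hnpos]
        by_cases hi1 : i + 1 < (hull.length : Int)
        · rw [Int.emod_eq_of_lt (by omega) hi1]
          rw [PySem.List.pyGetD_of_nonneg hull (0, 0) (by omega),
            PySem.List.pyGetD_of_nonneg (p0 :: ctail) (0, 0) (by omega),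
            show p0 :: ctail = hull ++ [p0] from hcyc.symm,
            List.getD_append _ _ _ _ (by omega)]
        · have hieq : i + 1 = (hull.length : Int) := by omega
          rw [hieq, Int.emod_self]
          rw [show PySem.List.pyGetD hull 0 (0,0) = p0 from by
            rw [hhdef]; exact PySem.List.pyGetD_zero_cons _ _ _,
            PySem.List.pyGetD_of_nonneg (p0 :: ctail) (0, 0) (by omega),
            show ((hull.length : Int)).toNat = hull.length from by omega,
            show p0 :: ctail = hull ++ [p0] from hcyc.symm,
            List.getD_eq_getElem _ _ (by simp),
            List.getElem_concat_length]
          rfl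
      simp only [h1, h2, pvG]
    rw [hcongr]
    -- step (b): the indexed loop is the structural shoelace sum
    have hloop : (PySem.List.pyRange 0 (hull.length : Int) 1).foldl (fun acc i =>
        acc + pvG (PySem.List.pyGetD (p0 :: ctail) i (0, 0))
          (PySem.List.pyGetD (p0 :: ctail) (i + 1) (0, 0))) 0 = pvS (p0 :: ctail) := by
      rw [PySem.List.pyRange_one, List.foldl_map]
      have hlen' : ((hull.length : Int) - 0).toNat = ctail.length := by
        rw [hlencyc]; omega
      rw [hlen']
      have hbody : (fun (acc : Int) (k : Nat) =>
          acc + pvG (PySem.List.pyGetD (p0 :: ctail) (0 + (k : Int)) (0, 0))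
            (PySem.List.pyGetD (p0 :: ctail) (0 + (k : Int) + 1) (0, 0)))
          = (fun acc k => acc + pvG ((p0 :: ctail).getD k (0, 0))
            ((p0 :: ctail).getD (k + 1) (0, 0))) := by
        funext acc k
        have h11 : (0 : Int) + (k : Int) + 1 = ((k + 1 : Nat) : Int) := by push_cast; ring
        have h01 : (0 : Int) + (k : Int) = ((k : Nat) : Int) := by omega
        rw [h11, h01, PySem.List.pyGetD_natCast, PySem.List.pyGetD_natCast]
      rw [hbody, pvRangeFold_eq_pvS ctail p0 0]
      ring
    rw [hloop]
    -- step 2: shoelace = trapezoid sum on the closed chain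
    have hclosed : pvS (p0 :: ctail) = pvT (p0 :: ctail) := by
      have h := pvS_eq_pvT_closed (mid ++ pe :: umid) p0 p0
      have hsh : p0 :: (mid ++ pe :: umid) ++ [p0] = p0 :: ctail := by simp [hct]
      rw [hsh] at h
      omega
    rw [hclosed]
    -- step 3: split the closed trapezoid sum into the two chains
    have hsplit : pvT (p0 :: ctail) = pvT L + pvT U := by
      have hshape : p0 :: ctail = (p0 :: mid) ++ pe :: (umid ++ [p0]) := by simp [hct]
      rw [hshape, pvT_split (p0 :: mid) pe (umid ++ [p0])]
      rw [show (p0 :: mid) ++ [pe] = L from by rw [hLdec],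
        show pe :: (umid ++ [p0]) = U from by rw [hUdec]; simp]
    rw [hsplit]
    -- step 4: each chain's trapezoid sum is what B's fused fold computes
    rw [pvChainArea_eq pts, pvChainArea_eq pts.reverse,
      pvTR_eq_pvT_reverse, pvTR_eq_pvT_reverse]
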